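-- pv_equiv track=rewrite | github.com/mihos3506/GoBP | gobp/mcp/tools/read.py | _build_breadcrumb
-- ===== SOURCE A (Python) =====
-- def _build_breadcrumb(group: str) -> list[dict[str, str]]:
--     """Navigable segments from schema v2 ``group`` path."""
--     if not group or not str(group).strip():
--         return []
--     parts = [p.strip() for p in str(group).split(">") if p.strip()]
--     crumbs: list[dict[str, str]] = []
--     for i in range(len(parts)):
--         path = " > ".join(parts[: i + 1])
--         crumbs.append({"label": parts[i], "path": path})
--     return crumbs
-- ===== SOURCE B (Python) =====
-- def _build_breadcrumb(group: str) -> list[dict[str, str]]: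
--     """Navigable segments from schema v2 ``group`` path."""
--     if not group or not str(group).strip():
--         return []
--     parts = [p.strip() for p in str(group).split(">") if p.strip()]
--     crumbs: list[dict[str, str]] = []
--     path = ""
--     for part in parts:
--         path = part if not crumbs else path + " > " + part
--         crumbs.append({"label": part, "path": path})
--     return crumbs
-- ===== Notes on version B (the rewrite author's own statement) =====
-- stated objective: alternative
-- what changed: B threads a running path accumulator through one pass over the parts, extending it with the separator and the next part incrementally, instead of re-joining the prefix parts[:i+1] from scratch at every index.
import Mathlib
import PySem

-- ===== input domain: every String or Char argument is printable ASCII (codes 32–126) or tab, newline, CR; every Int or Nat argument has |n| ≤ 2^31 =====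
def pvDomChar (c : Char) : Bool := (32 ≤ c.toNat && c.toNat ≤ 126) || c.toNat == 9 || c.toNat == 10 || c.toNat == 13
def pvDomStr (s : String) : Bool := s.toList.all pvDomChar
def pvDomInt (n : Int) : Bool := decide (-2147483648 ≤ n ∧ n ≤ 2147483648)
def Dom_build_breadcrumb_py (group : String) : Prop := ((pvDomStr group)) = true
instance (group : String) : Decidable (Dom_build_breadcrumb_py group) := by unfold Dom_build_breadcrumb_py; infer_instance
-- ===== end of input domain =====

-- B builds each breadcrumb path by threading a running accumulator through one pass
-- instead of re-joining the prefix parts[:i+1] at every index (objective: alternative).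


-- ===== PORT A =====
-- literal port of A: parts = stripped non-empty pieces of group.split(">");
-- for each i in range(len(parts)) the path is " > ".join(parts[:i+1]).
-- (split? is applied to the literal separator ">" ≠ "", where Python's split never raises; getD [] is unreachable)
def build_breadcrumb_py (group : String) : List (List (String × String)) :=
  if group = "" ∨ PySem.Str.strip group = "" then []
  else
    let parts := ((PySem.Str.split? group ">").getD []).filterMap (fun p =>
      let q := PySem.Str.strip p
      if q = "" then none else some q)
    (PySem.List.pyRange 0 parts.length 1).foldl (fun crumbs i =>
      let path := PySem.Str.join " > " (PySem.List.slice parts none (some (i + 1)))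
      crumbs ++ [[("label", PySem.List.pyGetD parts i ""), ("path", path)]]) []

-- ===== PORT B =====
-- B's loop body: extend the running path (first part as-is, else path + " > " + part)
def pvStepB (st : String × List (List (String × String))) (part : String) :
    String × List (List (String × String)) :=
  let path := if st.2 = [] then part else st.1 ++ " > " ++ part
  (path, st.2 ++ [[("label", part), ("path", path)]])

def build_breadcrumb_py_alt (group : String) : List (List (String × String)) :=
  if group = "" ∨ PySem.Str.strip group = "" then []
  else
    let parts := ((PySem.Str.split? group ">").getD []).filterMap (fun p =>
      let q := PySem.Str.strip p
      if q = "" then none else some q)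
    (parts.foldl pvStepB ("", [])).2

-- ===== PRECONDITION & SPEC =====
def Spec_build_breadcrumb_py (group : String) (out : List (List (String × String))) : Prop := out = build_breadcrumb_py_alt group
instance (group : String) (out : List (List (String × String))) : Decidable (Spec_build_breadcrumb_py group out) := by unfold Spec_build_breadcrumb_py; infer_instance

-- ===== CLAIM (what is proved, stated in full; the proofs are below) =====
def Claim_equal_build_breadcrumb_py : Prop := ∀ (group : String), Dom_build_breadcrumb_py group → Spec_build_breadcrumb_py group (build_breadcrumb_py group)

-- ===== LEMMAS AND PROOFS =====

-- the common recursive description of the crumb list: each crumb's path joins done ++ [p]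
def pvCrumbs (done : List String) : List String → List (List (String × String))
  | [] => []
  | p :: rest =>
    [("label", p), ("path", PySem.Str.join " > " (done ++ [p]))] :: pvCrumbs (done ++ [p]) rest

theorem pvChars_join_snoc (sep x : List Char) (l : List (List Char)) (h : l ≠ []) :
    PySem.Chars.join sep (l ++ [x]) = PySem.Chars.join sep l ++ sep ++ x := by
  induction l with
  | nil => exact absurd rfl h
  | cons a t ih =>
    cases t with
    | nil => simp [PySem.Chars.join_cons_cons, PySem.Chars.join_singleton]
    | cons b u =>
      rw [show (a :: b :: u) ++ [x] = a :: b :: (u ++ [x]) by simp,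
        PySem.Chars.join_cons_cons, ← List.cons_append, ih (by simp), PySem.Chars.join_cons_cons]
      simp [List.append_assoc]

theorem pvJoin_nil : PySem.Str.join " > " ([] : List String) = "" := by
  rw [← String.toList_inj]
  simp [PySem.Str.toList_join, PySem.Chars.join_nil]

theorem pvJoin_singleton (p : String) : PySem.Str.join " > " [p] = p := by
  rw [← String.toList_inj]
  simp [PySem.Str.toList_join, PySem.Chars.join_singleton]

theorem pvJoin_snoc (pre : List String) (p : String) (h : pre ≠ []) :
    PySem.Str.join " > " (pre ++ [p]) = PySem.Str.join " > " pre ++ " > " ++ p := by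
  rw [← String.toList_inj]
  simp only [PySem.Str.toList_join, List.map_append, List.map_cons, List.map_nil,
    String.toList_append]
  exact pvChars_join_snoc _ _ _ (by simpa using h)

theorem pvFoldB (rest : List String) : ∀ (done : List String) (cs : List (List (String × String))),
    (cs = [] ↔ done = []) →
    (rest.foldl pvStepB (PySem.Str.join " > " done, cs)).2 = cs ++ pvCrumbs done rest := by
  induction rest with
  | nil => intro done cs _; simp [pvCrumbs]
  | cons p rest ih =>
    intro done cs hiff
    have hstep : pvStepB (PySem.Str.join " > " done, cs) p
        = (PySem.Str.join " > " (done ++ [p]),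
           cs ++ [[("label", p), ("path", PySem.Str.join " > " (done ++ [p]))]]) := by
      by_cases hd : done = []
      · have hcs : cs = [] := hiff.mpr hd
        simp [pvStepB, hcs, hd, pvJoin_singleton]
      · have hcs : cs ≠ [] := fun h => hd (hiff.mp h)
        simp [pvStepB, hcs, pvJoin_snoc done p hd]
    rw [List.foldl_cons, hstep,
      ih (done ++ [p]) _ (by constructor <;> intro h <;> simp at h)]
    simp [pvCrumbs]

theorem pvFoldA (rest : List String) : ∀ (done : List String),
    (List.range rest.length).map (fun i =>
      [("label", (done ++ rest).getD (done.length + i) ""),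
       ("path", PySem.Str.join " > " ((done ++ rest).take (done.length + i + 1)))])
    = pvCrumbs done rest := by
  induction rest with
  | nil => intro done; simp [pvCrumbs]
  | cons p rest ih =>
    intro done
    rw [List.length_cons, List.range_succ_eq_map, List.map_cons, List.map_map]
    have hhead : (done ++ p :: rest).getD (done.length + 0) "" = p := by
      simp [List.getD_eq_getElem?_getD]
    have htake : (done ++ p :: rest).take (done.length + 0 + 1) = done ++ [p] := by
      rw [Nat.add_zero, List.take_append]
      simp
    rw [hhead, htake]
    have hbody : ((fun i =>
        [("label", (done ++ p :: rest).getD (done.length + i) ""),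
         ("path", PySem.Str.join " > " ((done ++ p :: rest).take (done.length + i + 1)))])
          ∘ Nat.succ)
        = (fun i =>
        [("label", ((done ++ [p]) ++ rest).getD ((done ++ [p]).length + i) ""),
         ("path", PySem.Str.join " > " (((done ++ [p]) ++ rest).take ((done ++ [p]).length + i + 1)))]) := by
      funext i
      simp only [Function.comp_apply, List.append_assoc, List.singleton_append,
        List.length_append, List.length_cons, List.length_nil, Nat.succ_eq_add_one]
      rw [show done.length + (i + 1) = done.length + 1 + i by omega]
    rw [hbody, ih (done ++ [p])]
    rfl

theorem pvA_eq_map (parts : List String) :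
    (PySem.List.pyRange 0 parts.length 1).foldl (fun crumbs i =>
      let path := PySem.Str.join " > " (PySem.List.slice parts none (some (i + 1)))
      crumbs ++ [[("label", PySem.List.pyGetD parts i ""), ("path", path)]]) []
    = (List.range parts.length).map (fun i =>
        [("label", parts.getD i ""),
         ("path", PySem.Str.join " > " (parts.take (i + 1)))]) := by
  rw [show ((parts.length : Int)) = ((parts.length : Nat) : Int) from rfl]
  rw [PySem.List.pyRange_zero_natCast]
  rw [PySem.List.foldl_append_singleton_eq_map]
  simp only [List.nil_append, List.map_map]
  apply List.map_congr_left
  intro i _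
  have h1 : ((i : Int) + 1) = ((i + 1 : Nat) : Int) := by push_cast; ring
  simp only [Function.comp_apply, h1, PySem.List.pyGetD_natCast,
    PySem.List.slice_to parts (b := ((i + 1 : Nat) : Int)) (Int.natCast_nonneg _),
    Int.toNat_natCast]

-- ===== VERDICT (by name: the statement is the Claim_ definition above) =====
theorem build_breadcrumb_py_spec : Claim_equal_build_breadcrumb_py := by
  intro group _
  unfold Spec_build_breadcrumb_py build_breadcrumb_py build_breadcrumb_py_alt
  by_cases hg : group = "" ∨ PySem.Str.strip group = ""
  · simp [hg]
  · simp only [if_neg hg]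
    set parts := ((PySem.Str.split? group ">").getD []).filterMap (fun p =>
      let q := PySem.Str.strip p
      if q = "" then none else some q)
    have hB : (parts.foldl pvStepB ("", [])).2 = pvCrumbs [] parts := by
      have := pvFoldB parts [] [] (by simp)
      rw [pvJoin_nil] at this
      simpa using this
    rw [hB, pvA_eq_map parts]
    have := pvFoldA parts []
    simpa using this
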